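-- pv_equiv track=rewrite | github.com/NorbertCode/csTimerAnalyst | times.py | PersonalBestProgression
-- ===== SOURCE A (Python) =====
-- def PersonalBestProgression(times):
--     timeNumbers = [] # The number of the solves, so you can see after how many solves a pb was beaten
--     personalbests = []
--
--     for i in range(len(times)):
--         if (len(personalbests) == 0 or times[i] < personalbests[len(personalbests) - 1]):
--             timeNumbers.append(i)
--             personalbests.append(times[i])
--
--     return timeNumbers, personalbests
-- ===== SOURCE B (Python) =====
-- def PersonalBestProgression(times):
--     # Pass 1: prefix-minimum table.
--     mins = []
--     cur = None
--     for t in times: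
--         cur = t if cur is None or t < cur else cur
--         mins.append(cur)
--     # Pass 2: detect strict drops of the running minimum.
--     timeNumbers = [i for i in range(len(mins)) if i == 0 or mins[i] < mins[i - 1]]
--     personalbests = [times[i] for i in timeNumbers]
--     return timeNumbers, personalbests
-- ===== Notes on version B (the rewrite author's own statement) =====
-- stated objective: alternative
-- what changed: Replaces A's single interleaved scan (appending to personalbests and comparing each time against that list's last element) with two separate passes: first build the prefix-minimum table, then a change-detection pass over indices that emits (i, times[i]) exactly where the running minimum strictly drops (or at i=0).
import Mathlib
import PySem

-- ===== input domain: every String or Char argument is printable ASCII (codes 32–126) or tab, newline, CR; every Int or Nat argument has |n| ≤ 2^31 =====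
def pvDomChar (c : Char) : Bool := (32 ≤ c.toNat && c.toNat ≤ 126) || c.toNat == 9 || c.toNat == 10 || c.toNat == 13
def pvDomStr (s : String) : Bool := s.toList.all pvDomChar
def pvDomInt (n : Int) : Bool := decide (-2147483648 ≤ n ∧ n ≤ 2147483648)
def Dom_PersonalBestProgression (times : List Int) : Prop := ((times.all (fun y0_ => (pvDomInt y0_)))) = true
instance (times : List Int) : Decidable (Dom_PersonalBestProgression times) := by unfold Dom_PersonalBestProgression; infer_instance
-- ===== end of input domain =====

-- B replaces A's single interleaved scan with a prefix-minimum table followed by a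
-- separate change-detection pass (objective: alternative decomposition; same cost).

-- ===== PORT A =====
-- A's loop body: state (timeNumbers, personalbests), one step per index i
def pvStepA (times : List Int) (st : List Int × List Int) (i : Int) : List Int × List Int :=
  if st.2.length = 0 ∨ PySem.List.pyGetD times i 0 < PySem.List.pyGetD st.2 ((st.2.length : Int) - 1) 0 then
    (st.1 ++ [i], st.2 ++ [PySem.List.pyGetD times i 0])
  else st

def PersonalBestProgression (times : List Int) : List Int × List Int :=
  (PySem.List.pyRange 0 (PySem.List.len times)).foldl (pvStepA times) ([], [])

-- ===== PORT B =====
-- pass 1 loop body: state (mins, cur); cur = None is `none`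
def pvMinsStep (st : List Int × Option Int) (t : Int) : List Int × Option Int :=
  let cur : Int :=
    match st.2 with
    | none => t
    | some m => if t < m then t else m
  (st.1 ++ [cur], some cur)

def PersonalBestProgression_alt (times : List Int) : List Int × List Int :=
  let mins := (times.foldl pvMinsStep ([], none)).1
  let timeNumbers := (PySem.List.pyRange 0 (PySem.List.len mins)).filter
    (fun i => i == 0 || decide (PySem.List.pyGetD mins i 0 < PySem.List.pyGetD mins (i - 1) 0))
  (timeNumbers, timeNumbers.map fun i => PySem.List.pyGetD times i 0)

-- ===== PRECONDITION & SPEC =====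
def Spec_PersonalBestProgression (times : List Int) (out : List Int × List Int) : Prop := out = PersonalBestProgression_alt times
instance (times : List Int) (out : List Int × List Int) : Decidable (Spec_PersonalBestProgression times out) := by unfold Spec_PersonalBestProgression; infer_instance

-- ===== CLAIM (what is proved, stated in full; the proofs are below) =====
def Claim_equal_PersonalBestProgression : Prop := ∀ (times : List Int), Dom_PersonalBestProgression times → Spec_PersonalBestProgression times (PersonalBestProgression times)

-- ===== LEMMAS AND PROOFS =====

-- common characterisation: personal-best progression of ts starting at index k with current best c
def pvPB : List Int → Nat → Option Int → List Int × List Int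
  | [], _, _ => ([], [])
  | t :: ts, k, none =>
      let r := pvPB ts (k + 1) (some t)
      ((k : Int) :: r.1, t :: r.2)
  | t :: ts, k, some m =>
      if t < m then
        let r := pvPB ts (k + 1) (some t)
        ((k : Int) :: r.1, t :: r.2)
      else pvPB ts (k + 1) (some m)

def pvMinsFrom : List Int → Int → List Int
  | [], _ => []
  | t :: ts, m => (if t < m then t else m) :: pvMinsFrom ts (if t < m then t else m)

def pvLastMin : List Int → Int → Int
  | [], m => m
  | t :: ts, m => pvLastMin ts (if t < m then t else m)

lemma pvMinsFrom_length : ∀ (ts : List Int) (m : Int), (pvMinsFrom ts m).length = ts.length := by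
  intro ts
  induction ts with
  | nil => intro m; rfl
  | cons t ts ih => intro m; simp [pvMinsFrom, ih]

lemma pvFoldA (times : List Int) : ∀ (ts : List Int) (k : Nat) (tns pbs : List Int),
    times.drop k = ts →
    (PySem.List.pyRange (k : Int) (PySem.List.len times)).foldl (pvStepA times) (tns, pbs)
      = (tns ++ (pvPB ts k pbs.getLast?).1, pbs ++ (pvPB ts k pbs.getLast?).2) := by
  intro ts
  induction ts with
  | nil =>
    intro k tns pbs hdrop
    have hlen : times.length ≤ k := by
      by_contra h
      have := congrArg List.length hdrop
      simp [List.length_drop] at this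
      omega
    rw [PySem.List.pyRange_one_eq_nil (by simp [PySem.List.len]; exact_mod_cast hlen)]
    simp [pvPB]
  | cons t ts ih =>
    intro k tns pbs hdrop
    have hk : k < times.length := by
      by_contra hle
      rw [List.drop_eq_nil_of_le (by omega)] at hdrop
      simp at hdrop
    have hget : PySem.List.pyGetD times (k : Int) 0 = t := by
      rw [PySem.List.pyGetD_natCast, List.getD_eq_getElem _ _ hk]
      have h0 : (times.drop k)[0]'(by simp [hdrop]) = t := by simp [hdrop]
      rw [List.getElem_drop] at h0
      simpa using h0
    have hdrop' : times.drop (k + 1) = ts := by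
      have := congrArg (List.drop 1) hdrop
      simpa [List.drop_drop, Nat.add_comm] using this
    rw [PySem.List.pyRange_one_cons (by simp [PySem.List.len]; exact_mod_cast hk)]
    rw [List.foldl_cons]
    have hrange : ((k : Int) + 1) = ((k + 1 : Nat) : Int) := by push_cast; ring
    cases hlast : pbs.getLast? with
    | none =>
      have hpbs : pbs = [] := List.getLast?_eq_none_iff.mp hlast
      subst hpbs
      have hstep : pvStepA times (tns, []) (k : Int) = (tns ++ [(k : Int)], [t]) := by
        simp [pvStepA, hget]
      rw [hstep, hrange, ih (k + 1) (tns ++ [(k : Int)]) [t] hdrop']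
      simp [pvPB]
    | some m =>
      have hne : pbs ≠ [] := by
        intro h; subst h; simp at hlast
      have hlen1 : 1 ≤ pbs.length := List.length_pos_iff.mpr hne
      have hgl : PySem.List.pyGetD pbs ((pbs.length : Int) - 1) 0 = m := by
        rw [show ((pbs.length : Int) - 1) = ((pbs.length - 1 : Nat) : Int) by omega]
        rw [PySem.List.pyGetD_natCast, List.getD_eq_getElem?_getD]
        rw [List.getLast?_eq_getElem?] at hlast
        simp [hlast]
      by_cases hlt : t < m
      · have hstep : pvStepA times (tns, pbs) (k : Int) = (tns ++ [(k : Int)], pbs ++ [t]) := by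
          simp [pvStepA, hget, hgl, hlt]
        rw [hstep, hrange, ih (k + 1) _ _ hdrop']
        rw [show (pbs ++ [t]).getLast? = some t by simp]
        simp [pvPB, hlt]
      · have hstep : pvStepA times (tns, pbs) (k : Int) = (tns, pbs) := by
          simp [pvStepA, hget, hgl, hlt, hne]
        rw [hstep, hrange, ih (k + 1) _ _ hdrop', hlast]
        simp [pvPB, hlt]

lemma pvFoldMins : ∀ (ts : List Int) (acc : List Int) (m : Int),
    ts.foldl pvMinsStep (acc, some m) = (acc ++ pvMinsFrom ts m, some (pvLastMin ts m)) := by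
  intro ts
  induction ts with
  | nil => intro acc m; simp [pvMinsFrom, pvLastMin]
  | cons t ts ih =>
    intro acc m
    simp only [List.foldl_cons, pvMinsStep, pvMinsFrom, pvLastMin]
    rw [ih]
    simp

lemma pvFilterB (mins : List Int) : ∀ (ts : List Int) (m : Int) (k : Nat),
    1 ≤ k → mins.drop (k - 1) = m :: pvMinsFrom ts m →
    (PySem.List.pyRange (k : Int) (PySem.List.len mins)).filter
        (fun i => i == 0 || decide (PySem.List.pyGetD mins i 0 < PySem.List.pyGetD mins (i - 1) 0))
      = (pvPB ts k (some m)).1 := by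
  intro ts
  induction ts with
  | nil =>
    intro m k hk1 hdrop
    have hlen : mins.length = k := by
      have := congrArg List.length hdrop
      simp [pvMinsFrom, List.length_drop] at this
      omega
    rw [PySem.List.pyRange_one_eq_nil (by simp [PySem.List.len, hlen])]
    simp [pvPB]
  | cons t ts ih =>
    intro m k hk1 hdrop
    have hlen : k + 1 ≤ mins.length := by
      have := congrArg List.length hdrop
      simp [pvMinsFrom, List.length_drop, pvMinsFrom_length] at this
      omega
    have hdropk : mins.drop k = (if t < m then t else m) :: pvMinsFrom ts (if t < m then t else m) := by
      have h1 := congrArg (List.drop 1) hdrop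
      rw [List.drop_drop, show k - 1 + 1 = k by omega] at h1
      simpa [pvMinsFrom] using h1
    have hminsk1 : PySem.List.pyGetD mins ((k : Int) - 1) 0 = m := by
      rw [show ((k : Int) - 1) = ((k - 1 : Nat) : Int) by omega]
      rw [PySem.List.pyGetD_natCast, List.getD_eq_getElem?_getD]
      have h0 : (mins.drop (k - 1))[0]? = some m := by rw [hdrop]; rfl
      rw [List.getElem?_drop] at h0
      simp only [Nat.add_zero] at h0
      simp [h0]
    have hminsk : PySem.List.pyGetD mins (k : Int) 0 = (if t < m then t else m) := by
      rw [PySem.List.pyGetD_natCast, List.getD_eq_getElem?_getD]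
      have h0 : (mins.drop k)[0]? = some (if t < m then t else m) := by rw [hdropk]; rfl
      rw [List.getElem?_drop] at h0
      simp only [Nat.add_zero] at h0
      simp [h0]
    have hkne : ((k : Int) == 0) = false := by
      simp; omega
    rw [PySem.List.pyRange_one_cons (by simp [PySem.List.len]; exact_mod_cast (by omega : k < mins.length))]
    rw [List.filter_cons]
    have hrange : ((k : Int) + 1) = ((k + 1 : Nat) : Int) := by push_cast; ring
    by_cases hlt : t < m
    · rw [if_pos (by simp [hkne, hminsk, hminsk1, hlt])]
      rw [hrange, ih t (k + 1) (by omega) (by simpa [hlt] using hdropk)]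
      simp [pvPB, hlt]
    · rw [if_neg (by simp [hkne, hminsk, hminsk1, hlt])]
      rw [hrange, ih m (k + 1) (by omega) (by simpa [hlt] using hdropk)]
      simp [pvPB, hlt]

lemma pvMapB (times : List Int) : ∀ (ts : List Int) (k : Nat) (c : Option Int),
    times.drop k = ts →
    (pvPB ts k c).1.map (fun i => PySem.List.pyGetD times i 0) = (pvPB ts k c).2 := by
  intro ts
  induction ts with
  | nil => intro k c _; cases c <;> simp [pvPB]
  | cons t ts ih =>
    intro k c hdrop
    have hk : k < times.length := by
      by_contra hle
      rw [List.drop_eq_nil_of_le (by omega)] at hdrop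
      simp at hdrop
    have hget : PySem.List.pyGetD times (k : Int) 0 = t := by
      rw [PySem.List.pyGetD_natCast, List.getD_eq_getElem _ _ hk]
      have h0 : (times.drop k)[0]'(by simp [hdrop]) = t := by simp [hdrop]
      rw [List.getElem_drop] at h0
      simpa using h0
    have hdrop' : times.drop (k + 1) = ts := by
      have := congrArg (List.drop 1) hdrop
      simpa [List.drop_drop, Nat.add_comm] using this
    cases c with
    | none => simp [pvPB, hget, ih (k+1) (some t) hdrop']
    | some m =>
      by_cases hlt : t < m
      · simp [pvPB, hlt, hget, ih (k+1) (some t) hdrop']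
      · simp [pvPB, hlt, ih (k+1) (some m) hdrop']

-- ===== VERDICT (by name: the statement is the Claim_ definition above) =====
theorem PersonalBestProgression_spec : Claim_equal_PersonalBestProgression := by
  intro times _
  unfold Spec_PersonalBestProgression
  have hA : PersonalBestProgression times = pvPB times 0 none := by
    unfold PersonalBestProgression
    have h := pvFoldA times times 0 [] [] (by simp)
    simpa using h
  rw [hA]
  cases times with
  | nil => rfl
  | cons t ts =>
    have hmins : ((t :: ts).foldl pvMinsStep ([], none)).1 = t :: pvMinsFrom ts t := by
      simp only [List.foldl_cons, pvMinsStep]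
      rw [pvFoldMins]
      simp
    unfold PersonalBestProgression_alt
    simp only [hmins]
    have hlenmins : PySem.List.len (t :: pvMinsFrom ts t) = ((ts.length + 1 : Nat) : Int) := by
      simp [PySem.List.len, pvMinsFrom_length]
    rw [PySem.List.pyRange_one_cons (by rw [hlenmins]; exact_mod_cast Nat.succ_pos ts.length)]
    rw [List.filter_cons, if_pos (by simp)]
    rw [show ((0 : Int) + 1) = ((1 : Nat) : Int) by norm_num]
    rw [pvFilterB (t :: pvMinsFrom ts t) ts t 1 (le_refl 1) (by simp)]
    rw [List.map_cons]
    rw [pvMapB (t :: ts) ts 1 (some t) (by simp)]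
    have hg0 : PySem.List.pyGetD (t :: ts) (0 : Int) 0 = t := by
      rw [show ((0 : Int)) = ((0 : Nat) : Int) by norm_num, PySem.List.pyGetD_natCast]
      rfl
    rw [hg0]
    show _ = pvPB (t :: ts) 0 none
    simp [pvPB]
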